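-- pv_equiv track=rewrite | github.com/vawsgit/accelerated-intelligent-document-processing-on-aws | lib/idp_common_pkg/idp_common/agents/error_analyzer/tools/cloudwatch_tool.py | _filter_performance_events
-- ===== SOURCE A (Python) =====
-- from typing import Any, Dict, List, Optional
--
-- def _filter_performance_events(
--     events: List[Dict], search_patterns: List[str]
-- ) -> List[Dict]:
--     """
--     Filter events for performance indicators.
--     """
--     performance_events = []
--     for event in events:
--         message = event.get("message", "").lower()
--         if any(p.lower() in message for p in search_patterns):
--             performance_events.append(event)
--     return performance_events
-- ===== SOURCE B (Python) =====
-- from typing import Any, Dict, List, Optional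
--
-- def _filter_performance_events(
--     events: List[Dict], search_patterns: List[str]
-- ) -> List[Dict]:
--     """
--     Filter events for performance indicators (pattern-major scan:
--     for each pattern mark the indices of matching events, then emit
--     the marked events in their original order).
--     """
--     lowered = [p.lower() for p in search_patterns]
--     messages = [e.get("message", "").lower() for e in events]
--     matched = set()
--     for p in lowered:
--         for i, m in enumerate(messages):
--             if p in m:
--                 matched.add(i)
--     return [e for i, e in enumerate(events) if i in matched]
-- ===== Notes on version B (the rewrite author's own statement) =====
-- stated objective: alternative
-- what changed: Loop order is inverted: instead of testing every pattern inside a per-event loop (re-lowering each pattern per event), B lowers patterns and messages once, scans pattern-major collecting the set of matching event indices, and then emits the marked events in order.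
import Mathlib
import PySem

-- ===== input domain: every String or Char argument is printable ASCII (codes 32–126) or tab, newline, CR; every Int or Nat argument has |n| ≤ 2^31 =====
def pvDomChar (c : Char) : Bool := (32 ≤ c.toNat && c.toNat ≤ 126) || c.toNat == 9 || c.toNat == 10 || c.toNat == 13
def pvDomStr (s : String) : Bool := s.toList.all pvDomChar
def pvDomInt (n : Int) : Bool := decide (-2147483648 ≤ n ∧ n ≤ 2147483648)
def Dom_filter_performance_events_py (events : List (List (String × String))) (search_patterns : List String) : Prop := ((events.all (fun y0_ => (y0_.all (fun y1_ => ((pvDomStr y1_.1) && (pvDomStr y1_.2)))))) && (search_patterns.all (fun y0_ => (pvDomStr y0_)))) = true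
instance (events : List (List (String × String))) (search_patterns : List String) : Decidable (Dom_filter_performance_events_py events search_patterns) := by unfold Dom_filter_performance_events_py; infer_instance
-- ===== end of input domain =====

-- B inverts the loop order (pattern-major index-set scan instead of per-event any()); alternative structure, same results.


-- ===== PORT A =====
def filter_performance_events_py (events : List (List (String × String))) (search_patterns : List String) : List (List (String × String)) :=
  events.foldl
    (fun performance_events event =>
      let message := PySem.Str.lower (PySem.Dict.getD (PySem.Dict.mk event) "message" "")
      if search_patterns.any (fun p => PySem.Str.isIn (PySem.Str.lower p) message) then
        performance_events ++ [event]
      else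
        performance_events)
    []

-- ===== PORT B =====
def filter_performance_events_py_alt (events : List (List (String × String))) (search_patterns : List String) : List (List (String × String)) :=
  let lowered := search_patterns.map PySem.Str.lower
  let messages := events.map (fun e => PySem.Str.lower (PySem.Dict.getD (PySem.Dict.mk e) "message" ""))
  let matched : PySem.Set Int :=
    lowered.foldl
      (fun s p =>
        (PySem.List.enumerate messages).foldl
          (fun s im => if PySem.Str.isIn p im.2 then PySem.Set.add s im.1 else s) s)
      PySem.Set.empty
  ((PySem.List.enumerate events).filter (fun ie => PySem.Set.contains matched ie.1)).map (fun ie => ie.2)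

-- ===== PRECONDITION & SPEC =====
def Spec_filter_performance_events_py (events : List (List (String × String))) (search_patterns : List String) (out : List (List (String × String))) : Prop := out = filter_performance_events_py_alt events search_patterns
instance (events : List (List (String × String))) (search_patterns : List String) (out : List (List (String × String))) : Decidable (Spec_filter_performance_events_py events search_patterns out) := by unfold Spec_filter_performance_events_py; infer_instance

-- ===== CLAIM (what is proved, stated in full; the proofs are below) =====
def Claim_equal_filter_performance_events_py : Prop := ∀ (events : List (List (String × String))) (search_patterns : List String), Dom_filter_performance_events_py events search_patterns → Spec_filter_performance_events_py events search_patterns (filter_performance_events_py events search_patterns)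

-- ===== LEMMAS AND PROOFS =====

-- lowered message of one event
def pvMsg (e : List (String × String)) : String :=
  PySem.Str.lower (PySem.Dict.getD (PySem.Dict.mk e) "message" "")

-- the event predicate both programs decide
def pvPred (lowered : List String) (e : List (String × String)) : Bool :=
  lowered.any (fun p => PySem.Str.isIn p (pvMsg e))

-- inner loop of B: which indices it adds
theorem pvInner_mem (p : String) (ms : List String) (k : Int) (s : PySem.Set Int) (x : Int) :
    x ∈ (PySem.List.enumerate ms k).foldl
        (fun s im => if PySem.Str.isIn p im.2 then PySem.Set.add s im.1 else s) s ↔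
      x ∈ s ∨ ∃ j : Nat, ∃ h : j < ms.length, x = k + j ∧ PySem.Str.isIn p ms[j] := by
  induction ms generalizing k s with
  | nil => simp [PySem.List.enumerate]
  | cons m t ih =>
    simp only [PySem.List.enumerate, List.foldl_cons]
    rw [ih]
    constructor
    · rintro (hs | ⟨j, hj, rfl, hp⟩)
      · split_ifs at hs with hm
        · rcases (PySem.Set.mem_add s k x).mp hs with h | rfl
          · exact Or.inl h
          · exact Or.inr ⟨0, by simp, by simp, by simpa using hm⟩
        · exact Or.inl hs
      · exact Or.inr ⟨j + 1, by simpa using Nat.succ_lt_succ hj, by push_cast; ring, by simpa using hp⟩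
    · rintro (hs | ⟨j, hj, rfl, hp⟩)
      · left
        split_ifs with hm
        · exact (PySem.Set.mem_add s k x).mpr (Or.inl hs)
        · exact hs
      · cases j with
        | zero =>
          left
          have hm : PySem.Str.isIn p m := by simpa using hp
          rw [if_pos hm]
          exact (PySem.Set.mem_add s k (k + (0:Nat))).mpr (Or.inr (by simp))
        | succ j =>
          right
          exact ⟨j, by simpa using Nat.lt_of_succ_lt_succ hj, by push_cast; ring, by simpa using hp⟩

-- outer loop of B: membership in the matched set
theorem pvMatched_mem (lowered : List String) (ms : List String) (s : PySem.Set Int) (x : Int) :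
    x ∈ lowered.foldl
        (fun s p =>
          (PySem.List.enumerate ms).foldl
            (fun s im => if PySem.Str.isIn p im.2 then PySem.Set.add s im.1 else s) s) s ↔
      x ∈ s ∨ ∃ j : Nat, ∃ h : j < ms.length, x = (j : Int) ∧
        ∃ p ∈ lowered, PySem.Str.isIn p ms[j] := by
  induction lowered generalizing s with
  | nil => simp
  | cons p t ih =>
    simp only [List.foldl_cons]
    rw [ih]
    constructor
    · rintro (hs | ⟨j, hj, rfl, q, hq, hp⟩)
      · rcases (pvInner_mem p ms 0 s x).mp hs with h | ⟨j, hj, hx, hp⟩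
        · exact Or.inl h
        · exact Or.inr ⟨j, hj, by simpa using hx, p, List.mem_cons_self .., hp⟩
      · exact Or.inr ⟨j, hj, rfl, q, List.mem_cons_of_mem _ hq, hp⟩
    · rintro (hs | ⟨j, hj, rfl, q, hq, hp⟩)
      · exact Or.inl ((pvInner_mem p ms 0 s x).mpr (Or.inl hs))
      · rcases List.mem_cons.mp hq with rfl | hq
        · exact Or.inl ((pvInner_mem q ms 0 s (j : Int)).mpr (Or.inr ⟨j, hj, by simp, hp⟩))
        · exact Or.inr ⟨j, hj, rfl, q, hq, hp⟩

-- reassembly of B's output from the index set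
theorem pvReassemble {α : Type} (es : List α) (k : Int) (c : Int → Bool) (q : α → Bool)
    (H : ∀ j : Nat, ∀ h : j < es.length, c (k + j) = q es[j]) :
    ((PySem.List.enumerate es k).filter (fun ie => c ie.1)).map (fun ie => ie.2)
      = es.filter q := by
  induction es generalizing k with
  | nil => simp [PySem.List.enumerate]
  | cons a t ih =>
    have h0 : c k = q a := by simpa using H 0 (by simp)
    have ht := ih (k + 1) (fun j h => by
      have h2 := H (j + 1) (by simpa using Nat.succ_lt_succ h)
      push_cast at h2
      rw [show k + 1 + (j : Int) = k + ((j : Int) + 1) by ring]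
      simpa using h2)
    simp only [PySem.List.enumerate, List.filter_cons, h0]
    by_cases hq : q a
    · simp [hq, ht]
    · simp [hq, ht]

-- ===== VERDICT (by name: the statement is the Claim_ definition above) =====
theorem filter_performance_events_py_spec : Claim_equal_filter_performance_events_py := by
  intro events search_patterns _
  unfold Spec_filter_performance_events_py
  unfold filter_performance_events_py filter_performance_events_py_alt
  rw [show ∀ l acc, List.foldl (fun (acc : List (List (String × String))) e =>
        if search_patterns.any (fun p => PySem.Str.isIn (PySem.Str.lower p)
            (PySem.Str.lower (PySem.Dict.getD (PySem.Dict.mk e) "message" ""))) = true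
        then acc ++ [e] else acc) acc l
      = acc ++ (l.filter (fun e => pvPred (search_patterns.map PySem.Str.lower) e)).map id
    from fun l acc => by
      rw [← PySem.List.foldl_append_if]
      simp [pvPred, pvMsg, List.any_map, Function.comp]]
  rw [List.map_id, List.nil_append]
  rw [pvReassemble events 0
      (fun x => PySem.Set.contains
        ((search_patterns.map PySem.Str.lower).foldl
          (fun s p =>
            (PySem.List.enumerate (events.map (fun e =>
              PySem.Str.lower (PySem.Dict.getD (PySem.Dict.mk e) "message" "")))).foldl
              (fun s im => if PySem.Str.isIn p im.2 then PySem.Set.add s im.1 else s) s)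
          PySem.Set.empty) x)
      (pvPred (search_patterns.map PySem.Str.lower))]
  intro j h
  rw [Bool.eq_iff_iff, PySem.Set.contains_iff,
    pvMatched_mem (search_patterns.map PySem.Str.lower)
      (events.map (fun e => PySem.Str.lower (PySem.Dict.getD (PySem.Dict.mk e) "message" ""))) _ _]
  simp only [PySem.Set.empty]
  constructor
  · rintro (h0 | ⟨i, hi, hx, q, hq, hp⟩)
    · simp at h0
    · have hji : (j:Int) = (i:Int) := by simpa using hx
      have : i = j := by exact_mod_cast hji.symm
      subst this
      simp only [pvPred, pvMsg, List.any_eq_true]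
      exact ⟨q, hq, by simpa using hp⟩
  · intro hp
    simp only [pvPred, pvMsg, List.any_eq_true] at hp
    obtain ⟨q, hq, hp⟩ := hp
    exact Or.inr ⟨j, by simpa using h, by simp, q, hq, by simpa using hp⟩
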